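-- pv_equiv track=rewrite | github.com/O-Q/GA-Project | ClassScheduling.py | get_course_room
-- ===== SOURCE A (Python) =====
-- def get_course_room(courses, rooms):
--     """
--     :param courses: dict that key is course and value is number of students
--     :param rooms: dict that key is name of room and value is capacity
--     :return: dict that key is course and value is rooms that fits to course and its student
--     """
--     course_room = dict()
--     for course in courses.keys():
--         for room in rooms.keys():
--             if courses[course] <= rooms[room]:
--                 if course_room.get(course):
--                     course_room[course].append(room)
--                 else:
--                     course_room[course] = [room]
--     return course_room
-- ===== SOURCE B (Python) =====
-- def _cut(caps, x, lo, hi):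
--     # binary search in the sorted capacities: first position in caps[lo:hi] with value >= x
--     if lo >= hi:
--         return lo
--     mid = (lo + hi) // 2
--     if caps[mid] < x:
--         return _cut(caps, x, mid + 1, hi)
--     return _cut(caps, x, lo, mid)
--
--
-- def get_course_room(courses, rooms):
--     # Stage 1: index the rooms in insertion order and sort the triples by
--     # capacity (stable sort, so equal capacities keep their original order).
--     indexed = sorted(((cap, i, name) for i, (name, cap) in enumerate(rooms.items())),
--                      key=lambda t: t[0])
--     caps = [t[0] for t in indexed]
--     # Stage 2: per course, binary-search for the suffix of fitting rooms and
--     # restore the rooms' original insertion order by sorting on their index.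
--     course_room = {}
--     for course, students in courses.items():
--         fits = sorted(indexed[_cut(caps, students, 0, len(caps)):],
--                       key=lambda t: t[1])
--         if fits:
--             course_room[course] = [name for _, _, name in fits]
--     return course_room
-- ===== Notes on version B (the rewrite author's own statement) =====
-- stated objective: alternative
-- what changed: B replaces A's nested course-by-room scan with a staged sort-and-binary-search algorithm: it sorts the rooms once by capacity with their insertion index, per course binary-searches (hand-written bisect_left) for the suffix of fitting rooms, and re-sorts that suffix by index to restore the rooms' insertion order.
import Mathlib
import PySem

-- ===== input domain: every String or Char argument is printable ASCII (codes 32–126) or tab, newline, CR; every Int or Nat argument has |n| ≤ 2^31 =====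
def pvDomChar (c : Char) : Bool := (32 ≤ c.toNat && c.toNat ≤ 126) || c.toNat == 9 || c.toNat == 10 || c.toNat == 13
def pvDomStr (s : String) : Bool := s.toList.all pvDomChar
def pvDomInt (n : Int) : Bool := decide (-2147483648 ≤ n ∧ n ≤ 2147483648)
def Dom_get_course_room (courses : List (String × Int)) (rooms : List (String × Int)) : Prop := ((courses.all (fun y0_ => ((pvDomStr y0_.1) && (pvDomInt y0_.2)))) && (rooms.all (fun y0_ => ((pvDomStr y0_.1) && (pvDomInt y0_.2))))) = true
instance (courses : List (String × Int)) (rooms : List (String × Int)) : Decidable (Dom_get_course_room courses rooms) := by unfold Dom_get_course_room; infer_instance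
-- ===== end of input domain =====

-- B replaces A's nested course-by-room scan by sort-once + per-course binary search
-- (suffix of fitting rooms, re-sorted by insertion index); objective: alternative algorithm.

-- ===== PORT A =====
-- A iterates dict keys and indexes back into the dicts; `courses[course]` / `rooms[room]`
-- are ported as getD with a dummy default, exact here because the key comes from .keys().
-- `if course_room.get(course):` is truthiness of Optional[list]: none and the empty list
-- both fail it, so it is ported as `cr.getD course [] = []` (exact).
def get_course_room (courses : List (String × Int)) (rooms : List (String × Int)) : List (String × List String) :=
  let cd := PySem.Dict.ofList courses
  let rd := PySem.Dict.ofList rooms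
  let course_room :=
    cd.keys.foldl (fun cr course =>
      rd.keys.foldl (fun cr room =>
        if cd.getD course 0 ≤ rd.getD room 0 then
          if cr.getD course [] = [] then cr.insert course [room]
          else cr.insert course (cr.getD course [] ++ [room])
        else cr) cr) (PySem.Dict.empty : PySem.Dict String (List String))
  course_room.items

-- ===== PORT B =====
-- Source B's `_cut`, recursion on hi - lo; `caps[mid]` is in range at every call
-- (lo ≤ mid < hi ≤ len(caps)), so it is ported as getD with a dummy default.
def cutAux (caps : List Int) (x : Int) (lo hi : Nat) : Nat :=
  if lo ≥ hi then lo
  else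
    let mid := (lo + hi) / 2
    if caps.getD mid 0 < x then cutAux caps x (mid + 1) hi
    else cutAux caps x lo mid
termination_by hi - lo
decreasing_by all_goals omega

-- `indexed[k:]` with the Nat result k of _cut is PySem.List.slice indexed (some k).
def get_course_room_alt (courses : List (String × Int)) (rooms : List (String × Int)) : List (String × List String) :=
  let cd := PySem.Dict.ofList courses
  let rd := PySem.Dict.ofList rooms
  let indexed := PySem.List.sorted ((PySem.List.enumerate rd.items).map (fun p => (p.2.2, p.1, p.2.1))) (fun t => t.1) false
  let caps := indexed.map (fun t => t.1)
  let course_room := cd.items.foldl (fun d p =>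
      let fits := PySem.List.sorted
        (PySem.List.slice indexed (some ((cutAux caps p.2 0 caps.length : Nat) : Int)) none)
        (fun t => t.2.1) false
      if fits ≠ [] then d.insert p.1 (fits.map (fun t => t.2.2)) else d)
    (PySem.Dict.empty : PySem.Dict String (List String))
  course_room.items

-- ===== PRECONDITION & SPEC =====
def Spec_get_course_room (courses : List (String × Int)) (rooms : List (String × Int)) (out : List (String × List String)) : Prop := out = get_course_room_alt courses rooms
instance (courses : List (String × Int)) (rooms : List (String × Int)) (out : List (String × List String)) : Decidable (Spec_get_course_room courses rooms out) := by unfold Spec_get_course_room; infer_instance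

-- ===== CLAIM (what is proved, stated in full; the proofs are below) =====
def Claim_equal_get_course_room : Prop := ∀ (courses : List (String × Int)) (rooms : List (String × Int)), Dom_get_course_room courses rooms → Spec_get_course_room courses rooms (get_course_room courses rooms)

-- ===== LEMMAS AND PROOFS =====

-- the room names that fit n students, in room order
def fitNames (n : Int) (rms : List (String × Int)) : List String :=
  (rms.filter (fun r => n ≤ r.2)).map (·.1)

-- common normal form of both results
def canonCR (cs rms : List (String × Int)) : List (String × List String) :=
  (cs.map (fun p => (p.1, fitNames p.2 rms))).filter (fun q => !q.2.isEmpty)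

-- re-inserting the value a key already holds is the identity (nodup keys)
theorem insert_self_of_get? {ν : Type} (d : PySem.Dict String ν) (k : String) (v : ν)
    (hnd : d.keys.Nodup) (h : d.get? k = some v) : d.insert k v = d := by
  apply PySem.Dict.ext
  have hc : d.contains k = true := by
    rw [PySem.Dict.contains_eq_isSome_get?, h]; rfl
  rw [PySem.Dict.items_insert_of_contains d v hc]
  have : ∀ p ∈ d.items, (if (p.1 == k) = true then (k, v) else p) = p := by
    rintro ⟨k', v'⟩ hp
    by_cases hk : k' = k
    · subst hk
      have := PySem.Dict.get?_of_mem_items d hp hnd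
      rw [h] at this
      simp at this ⊢
      exact this
    · simp [hk]
  rw [List.map_congr_left this]; exact List.map_id _

-- A's inner loop over the rooms, one course at a time
theorem innerA_eq (rs : List (String × Int)) (c : String) (n : Int)
    (cr : PySem.Dict String (List String)) (hnd : cr.keys.Nodup) :
    rs.foldl (fun cr p =>
        if n ≤ p.2 then
          if cr.getD c [] = [] then cr.insert c [p.1]
          else cr.insert c (cr.getD c [] ++ [p.1])
        else cr) cr
      = (if cr.getD c [] ++ fitNames n rs = [] then cr
         else cr.insert c (cr.getD c [] ++ fitNames n rs)) := by
  induction rs generalizing cr with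
  | nil =>
    simp only [List.foldl_nil, fitNames, List.filter_nil, List.map_nil, List.append_nil]
    split_ifs with h
    · rfl
    · rcases hget : cr.get? c with _ | l
      · exact absurd (by rw [PySem.Dict.getD_eq_get?_getD, hget]; rfl) h
      · have hd : cr.getD c [] = l := by rw [PySem.Dict.getD_eq_get?_getD, hget]; rfl
        rw [hd]
        exact (insert_self_of_get? cr c l hnd hget).symm
  | cons p rs ih =>
    by_cases hfit : n ≤ p.2
    · have hfn : fitNames n (p :: rs) = p.1 :: fitNames n rs := by
        simp [fitNames, hfit]
      by_cases hl : cr.getD c [] = []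
      · simp only [List.foldl_cons, hfit, if_true, hl]
        rw [ih _ (PySem.Dict.nodup_keys_insert _ _ _ hnd)]
        rw [PySem.Dict.getD_insert_self]
        simp [PySem.Dict.insert_insert_self, hfn]
      · simp only [List.foldl_cons, hfit, if_true, if_neg hl]
        rw [ih _ (PySem.Dict.nodup_keys_insert _ _ _ hnd)]
        rw [PySem.Dict.getD_insert_self]
        simp [PySem.Dict.insert_insert_self, hfn, hl]
    · have hfn : fitNames n (p :: rs) = fitNames n rs := by
        simp [fitNames, hfit]
      simp only [List.foldl_cons, hfit, if_false, hfn]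
      exact ih cr hnd

-- A's outer loop appends one entry per course with a non-empty fit list
theorem outerA_eq (rs : List (String × Int)) :
    ∀ (cs : List (String × Int)) (cr : PySem.Dict String (List String)),
    cr.keys.Nodup → (cs.map (·.1)).Nodup → (∀ p ∈ cs, cr.get? p.1 = none) →
    (cs.foldl (fun cr q =>
        rs.foldl (fun cr p =>
          if q.2 ≤ p.2 then
            if cr.getD q.1 [] = [] then cr.insert q.1 [p.1]
            else cr.insert q.1 (cr.getD q.1 [] ++ [p.1])
          else cr) cr) cr).items
      = cr.items ++ canonCR cs rs := by
  intro cs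
  induction cs with
  | nil => intro cr _ _ _; simp [canonCR]
  | cons q cs ih =>
    intro cr hnd hkeys hfresh
    have hq : cr.get? q.1 = none := hfresh q (List.mem_cons_self)
    have hgd : cr.getD q.1 [] = [] := by
      rw [PySem.Dict.getD_eq_get?_getD, hq]; rfl
    have hnotq : q.1 ∉ cs.map (·.1) := by
      simpa using (List.nodup_cons.mp hkeys).1
    have hknd : (cs.map (·.1)).Nodup := (List.nodup_cons.mp hkeys).2
    rw [List.foldl_cons, innerA_eq rs q.1 q.2 cr hnd, hgd]
    by_cases hfit : fitNames q.2 rs = []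
    · rw [List.nil_append, if_pos hfit]
      rw [ih cr hnd hknd (fun p hp => hfresh p (List.mem_cons_of_mem _ hp))]
      have : canonCR (q :: cs) rs = canonCR cs rs := by
        simp [canonCR, hfit]
      rw [this]
    · rw [List.nil_append, if_neg hfit]
      have hcont : cr.contains q.1 = false := by
        rw [PySem.Dict.contains_eq_isSome_get?, hq]; rfl
      have hfresh' : ∀ p ∈ cs, (cr.insert q.1 (fitNames q.2 rs)).get? p.1 = none := by
        intro p hp
        have hne : p.1 ≠ q.1 := fun h => hnotq (h ▸ List.mem_map_of_mem hp)
        rw [PySem.Dict.get?_insert_of_ne _ _ hne]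
        exact hfresh p (List.mem_cons_of_mem _ hp)
      rw [ih _ (PySem.Dict.nodup_keys_insert _ _ _ hnd) hknd hfresh']
      rw [PySem.Dict.items_insert_of_not_contains _ _ hcont]
      have : canonCR (q :: cs) rs = (q.1, fitNames q.2 rs) :: canonCR cs rs := by
        simp [canonCR, hfit]
      rw [this, List.append_assoc]
      rfl

theorem portA_eq_canon (courses rooms : List (String × Int)) :
    get_course_room courses rooms
      = canonCR (PySem.Dict.ofList courses).items (PySem.Dict.ofList rooms).items := by
  have hcnd := PySem.Dict.nodup_keys_ofList courses
  have hrnd := PySem.Dict.nodup_keys_ofList rooms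
  simp only [get_course_room]
  have hA : (PySem.Dict.ofList courses).keys.foldl (fun cr course =>
        (PySem.Dict.ofList rooms).keys.foldl (fun cr room =>
          if (PySem.Dict.ofList courses).getD course 0 ≤ (PySem.Dict.ofList rooms).getD room 0 then
            if cr.getD course [] = [] then cr.insert course [room]
            else cr.insert course (cr.getD course [] ++ [room])
          else cr) cr) (PySem.Dict.empty : PySem.Dict String (List String))
      = (PySem.Dict.ofList courses).items.foldl (fun cr q =>
        (PySem.Dict.ofList rooms).items.foldl (fun cr p =>
          if q.2 ≤ p.2 then
            if cr.getD q.1 [] = [] then cr.insert q.1 [p.1]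
            else cr.insert q.1 (cr.getD q.1 [] ++ [p.1])
          else cr) cr) (PySem.Dict.empty : PySem.Dict String (List String)) := by
    conv_rhs => rw [PySem.Dict.items_eq_map_keys _ hcnd 0]
    rw [List.foldl_map]
    apply PySem.List.foldl_congr_mem
    intro acc k _
    conv_rhs => rw [PySem.Dict.items_eq_map_keys _ hrnd 0]
    rw [List.foldl_map]
  rw [hA, outerA_eq _ _ _ (by simp [PySem.Dict.keys_empty])
    (by simpa [PySem.Dict.keys] using hcnd)
    (fun p _ => PySem.Dict.get?_empty p.1)]
  simp [PySem.Dict.empty]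

-- ===== B-side lemmas =====

-- binary-search invariant: everything left of the cut is < x, everything right is ≥ x
theorem cutAux_spec (caps : List Int) (x : Int) (hs : caps.Pairwise (· ≤ ·)) :
    ∀ (n lo hi : Nat), hi - lo = n → lo ≤ hi → hi ≤ caps.length →
    (∀ j, j < lo → j < caps.length → caps.getD j 0 < x) →
    (∀ j, hi ≤ j → j < caps.length → x ≤ caps.getD j 0) →
    (∀ j, j < cutAux caps x lo hi → j < caps.length → caps.getD j 0 < x) ∧
    (∀ j, cutAux caps x lo hi ≤ j → j < caps.length → x ≤ caps.getD j 0) := by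
  have hmono : ∀ i j : Nat, i ≤ j → j < caps.length → caps.getD i 0 ≤ caps.getD j 0 := by
    intro i j hij hj
    rcases Nat.eq_or_lt_of_le hij with h | h
    · subst h; exact le_refl _
    · rw [List.getD_eq_getElem _ _ (lt_trans h hj), List.getD_eq_getElem _ _ hj]
      exact List.pairwise_iff_getElem.mp hs i j _ _ h
  intro n
  induction n using Nat.strong_induction_on with
  | _ n ih =>
    intro lo hi hn hle hlen hlo hhi
    rw [cutAux]
    by_cases hge : lo ≥ hi
    · rw [if_pos hge]
      refine ⟨hlo, fun j hj hjl => hhi j (by omega) hjl⟩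
    · rw [if_neg hge]
      have hmidlo : lo ≤ (lo + hi) / 2 := by omega
      have hmidhi : (lo + hi) / 2 < hi := by omega
      by_cases hc : caps.getD ((lo + hi) / 2) 0 < x
      · rw [if_pos hc]
        refine ih (hi - ((lo + hi) / 2 + 1)) (by omega) _ _ rfl (by omega) hlen ?_ hhi
        intro j hj hjl
        exact lt_of_le_of_lt (hmono j ((lo + hi) / 2) (by omega) (by omega)) hc
      · rw [if_neg hc]
        refine ih ((lo + hi) / 2 - lo) (by omega) _ _ rfl (by omega) (by omega) hlo ?_
        intro j hj hjl
        exact le_trans (not_lt.mp hc) (hmono ((lo + hi) / 2) j hj hjl)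

-- dropping at the cut position of a fst-sorted triple list IS filtering by capacity
theorem drop_cut_eq_filter (l : List (Int × Int × String)) (x : Int)
    (hs : l.Pairwise (fun a b => a.1 ≤ b.1)) :
    l.drop (cutAux (l.map (fun t => t.1)) x 0 (l.map (fun t => t.1)).length)
      = l.filter (fun t => x ≤ t.1) := by
  set caps := l.map (fun t => t.1) with hcaps
  have hcs : caps.Pairwise (· ≤ ·) := by
    rw [hcaps, List.pairwise_map]; exact hs
  have hgd : ∀ j (hj : j < l.length), caps.getD j 0 = l[j].1 := by
    intro j hj
    rw [hcaps, List.getD_eq_getElem _ _ (by simpa using hj), List.getElem_map]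
  have hspec := cutAux_spec caps x hcs (caps.length - 0) 0 caps.length rfl (Nat.zero_le _)
    (le_refl _) (by omega) (by omega)
  set k := cutAux caps x 0 caps.length with hk
  have hlen : caps.length = l.length := by rw [hcaps, List.length_map]
  conv_rhs => rw [← List.take_append_drop k l]
  rw [List.filter_append]
  have h1 : (l.take k).filter (fun t => x ≤ t.1) = [] := by
    rw [List.filter_eq_nil_iff]
    intro a ha
    rcases List.mem_take_iff_getElem.mp ha with ⟨i, hi, rfl⟩
    have hil : i < l.length := lt_of_lt_of_le hi (by simp)
    have := hspec.1 i (lt_of_lt_of_le hi (by omega)) (by omega)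
    rw [hgd i hil] at this
    simpa using not_le.mpr this
  have h2 : (l.drop k).filter (fun t => x ≤ t.1) = l.drop k := by
    rw [List.filter_eq_self]
    intro a ha
    rcases List.mem_drop_iff_getElem.mp ha with ⟨i, hi, rfl⟩
    have hil : k + i < l.length := by omega
    have := hspec.2 (k + i) (Nat.le_add_right _ _) (by omega)
    rw [hgd _ hil] at this
    simpa using this
  rw [h1, h2, List.nil_append]

-- per course: binary-search suffix + re-sort by index = the fitting triples in room order
theorem fits_eq (rms : List (String × Int)) (n : Int) :
    PySem.List.sorted
      ((PySem.List.sorted ((PySem.List.enumerate rms).map (fun p => (p.2.2, p.1, p.2.1))) (fun t => t.1) false).drop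
        (cutAux ((PySem.List.sorted ((PySem.List.enumerate rms).map (fun p => (p.2.2, p.1, p.2.1))) (fun t => t.1) false).map (fun t => t.1)) n 0
          ((PySem.List.sorted ((PySem.List.enumerate rms).map (fun p => (p.2.2, p.1, p.2.1))) (fun t => t.1) false).map (fun t => t.1)).length))
      (fun t => t.2.1) false
      = ((PySem.List.enumerate rms).map (fun p => (p.2.2, p.1, p.2.1))).filter (fun t => n ≤ t.1) := by
  set tri := (PySem.List.enumerate rms).map (fun p : Int × String × Int => (p.2.2, p.1, p.2.1)) with htri
  set indexed := PySem.List.sorted tri (fun t => t.1) false with hidx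
  have hs : indexed.Pairwise (fun a b => a.1 ≤ b.1) := PySem.List.sorted_pairwise tri (fun t => t.1)
  rw [drop_cut_eq_filter indexed n hs]
  apply PySem.List.sorted_eq_of_perm_of_pairwise_lt
  · exact ((PySem.List.sorted_perm tri (fun t => t.1) false).filter _).symm
  · apply List.Pairwise.filter
    rw [htri, List.pairwise_map]
    exact PySem.List.pairwise_lt_enumerate rms 0

-- projecting the names out of the fitting triples gives fitNames
theorem names_eq (rms : List (String × Int)) (n : Int) : ∀ (s : Int),
    (((PySem.List.enumerate rms s).map (fun p => (p.2.2, p.1, p.2.1))).filter (fun t => n ≤ t.1)).map (fun t => t.2.2)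
      = fitNames n rms := by
  induction rms with
  | nil => intro s; simp [fitNames]
  | cons r rs ih =>
    intro s
    by_cases hfit : n ≤ r.2
    · have hfn : fitNames n (r :: rs) = r.1 :: fitNames n rs := by simp [fitNames, hfit]
      rw [PySem.List.enumerate_cons, hfn]
      simp [hfit, ih (s + 1)]
    · have hfn : fitNames n (r :: rs) = fitNames n rs := by simp [fitNames, hfit]
      rw [PySem.List.enumerate_cons, hfn]
      simp [hfit, ih (s + 1)]

theorem portB_eq_canon (courses rooms : List (String × Int)) :
    get_course_room_alt courses rooms
      = canonCR (PySem.Dict.ofList courses).items (PySem.Dict.ofList rooms).items := by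
  have hcnd : ((PySem.Dict.ofList courses).items.map (·.1)).Nodup := by
    simpa [PySem.Dict.keys] using PySem.Dict.nodup_keys_ofList courses
  simp only [get_course_room_alt]
  set cd := PySem.Dict.ofList courses with hcd
  set rd := PySem.Dict.ofList rooms with hrd
  set indexed := PySem.List.sorted ((PySem.List.enumerate rd.items).map (fun p => (p.2.2, p.1, p.2.1))) (fun t => t.1) false with hidx
  set caps := indexed.map (fun t => t.1) with hcaps
  have hbody : ∀ (acc : PySem.Dict String (List String)), ∀ p ∈ cd.items,
      (let fits := PySem.List.sorted
        (PySem.List.slice indexed (some ((cutAux caps p.2 0 caps.length : Nat) : Int)) none)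
        (fun t => t.2.1) false
       if fits ≠ [] then acc.insert p.1 (fits.map (fun t => t.2.2)) else acc)
      = (if fitNames p.2 rd.items ≠ [] then acc.insert p.1 (fitNames p.2 rd.items) else acc) := by
    intro acc p _
    have hsl : PySem.List.slice indexed (some ((cutAux caps p.2 0 caps.length : Nat) : Int)) none
        = indexed.drop (cutAux caps p.2 0 caps.length) := by
      rw [PySem.List.slice_from indexed (Int.natCast_nonneg _), Int.toNat_natCast]
    have hfit : PySem.List.sorted (indexed.drop (cutAux caps p.2 0 caps.length)) (fun t => t.2.1) false
        = ((PySem.List.enumerate rd.items).map (fun q => (q.2.2, q.1, q.2.1))).filter (fun t => p.2 ≤ t.1) := fits_eq rd.items p.2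
    have hnm := names_eq rd.items p.2 0
    simp only [hsl, hfit]
    rw [hnm] -- rewrites the inserted value
    by_cases hne : ((PySem.List.enumerate rd.items).map (fun q => (q.2.2, q.1, q.2.1))).filter (fun t => p.2 ≤ t.1) = []
    · have h0 : fitNames p.2 rd.items = [] := by rw [← hnm, hne]; rfl
      simp [hne, h0]
    · have h0 : fitNames p.2 rd.items ≠ [] := by
        rw [← hnm]; simpa [List.map_eq_nil_iff] using hne
      simp [hne, h0]
  rw [PySem.List.foldl_congr_mem cd.items _
    (fun acc p => if fitNames p.2 rd.items ≠ [] then acc.insert p.1 (fitNames p.2 rd.items) else acc)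
    _ hbody]
  have hfold : cd.items.foldl (fun acc p => if fitNames p.2 rd.items ≠ [] then acc.insert p.1 (fitNames p.2 rd.items) else acc) (PySem.Dict.empty : PySem.Dict String (List String))
      = (cd.items.filter (fun p => decide (fitNames p.2 rd.items ≠ []))).foldl (fun acc p => acc.insert p.1 (fitNames p.2 rd.items)) PySem.Dict.empty :=
    PySem.List.foldl_ite_eq_foldl_filter _ _ _ _
  rw [hfold]
  have hnd' : ((cd.items.filter (fun p => decide (fitNames p.2 rd.items ≠ []))).map (fun p => p.1)).Nodup :=
    List.Nodup.sublist (List.Sublist.map _ List.filter_sublist) hcnd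
  have hins : ((cd.items.filter (fun p => decide (fitNames p.2 rd.items ≠ []))).foldl (fun acc p => acc.insert p.1 (fitNames p.2 rd.items)) (PySem.Dict.empty : PySem.Dict String (List String))).items
      = (PySem.Dict.empty : PySem.Dict String (List String)).items ++ (cd.items.filter (fun p => decide (fitNames p.2 rd.items ≠ []))).map (fun p => (p.1, fitNames p.2 rd.items)) :=
    PySem.Dict.items_foldl_insert_fresh (cd.items.filter (fun p => decide (fitNames p.2 rd.items ≠ []))) (fun p : String × Int => p.1) (fun p : String × Int => fitNames p.2 rd.items) PySem.Dict.empty (fun a _ => PySem.Dict.contains_empty a.1) hnd'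
  rw [hins]
  have hcanon : canonCR cd.items rd.items
      = (cd.items.filter (fun p => decide (fitNames p.2 rd.items ≠ []))).map
          (fun p => (p.1, fitNames p.2 rd.items)) := by
    rw [canonCR, List.filter_map]
    congr 1
    apply List.filter_congr
    intro p _
    cases h : fitNames p.2 rd.items <;> simp [Function.comp, h]
  rw [hcanon]
  simp [PySem.Dict.empty]

-- ===== VERDICT (by name: the statement is the Claim_ definition above) =====
theorem get_course_room_spec : Claim_equal_get_course_room := by
  intro courses rooms _
  unfold Spec_get_course_room
  rw [portA_eq_canon, portB_eq_canon]
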